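-- pv_equiv track=rewrite | github.com/OALabs/hashdb-ida | hashdb.py | html_format_invalid_characters
-- ===== SOURCE A (Python) =====
-- def html_format_invalid_characters(string: str, invalid_characters: list, color: str = "#F44336") -> str:
--     # Are there any invalid characters in the string?
--     if not invalid_characters:
--         return string
--
--     # Format the invalid characters
--     formatted_string = ""
--     for index, character in enumerate(string):
--         if index in invalid_characters and color:
--             formatted_string += "<span style=\"color: {}\">{}</span>".format(color, character)
--         else:
--             formatted_string += character
--
--     # Return the formatted string
--     return formatted_string
-- ===== SOURCE B (Python) =====
-- def html_format_invalid_characters(string: str, invalid_characters: list, color: str = "#F44336") -> str: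
--     if not invalid_characters:
--         return string
--     if not color:
--         return string
--     indices = sorted({i for i in invalid_characters if 0 <= i < len(string)})
--     parts = []
--     prev = 0
--     for i in indices:
--         parts.append(string[prev:i])
--         parts.append('<span style="color: {}">{}</span>'.format(color, string[i]))
--         prev = i + 1
--     parts.append(string[prev:])
--     return "".join(parts)
-- ===== Notes on version B (the rewrite author's own statement) =====
-- stated objective: faster
-- what changed: Instead of testing 'index in invalid_characters' for every character (a linear scan of the list per character), B dedups/filters the indices once into a sorted set and walks only the marked positions, copying the untouched stretches as slices.
import Mathlib
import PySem

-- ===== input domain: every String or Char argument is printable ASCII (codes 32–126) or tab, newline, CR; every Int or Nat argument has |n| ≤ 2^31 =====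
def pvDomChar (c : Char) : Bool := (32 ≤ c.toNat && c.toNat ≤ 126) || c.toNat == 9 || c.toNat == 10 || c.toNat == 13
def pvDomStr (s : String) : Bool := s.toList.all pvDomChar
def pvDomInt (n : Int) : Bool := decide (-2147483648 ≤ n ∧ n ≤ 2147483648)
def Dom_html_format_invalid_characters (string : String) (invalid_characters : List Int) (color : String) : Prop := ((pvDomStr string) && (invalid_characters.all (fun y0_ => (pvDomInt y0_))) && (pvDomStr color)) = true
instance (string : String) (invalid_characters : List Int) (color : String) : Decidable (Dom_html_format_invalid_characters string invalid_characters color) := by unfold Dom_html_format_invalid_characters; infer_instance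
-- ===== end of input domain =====

-- B replaces the per-character membership scan by one sorted deduplicated index list
-- walked with slice copies between marked positions (objective: faster).


-- shared literal: '<span style="color: {}">{}</span>'.format(color, character), as chars
def pvSpan (color : String) (c : Char) : List Char :=
  "<span style=\"color: ".toList ++ color.toList ++ "\">".toList ++ [c] ++ "</span>".toList

-- ===== PORT A =====
-- strings are ported through List Char (PySem convention); 'index in invalid_characters and color'
def html_format_invalid_characters (string : String) (invalid_characters : List Int) (color : String) : String :=
  if invalid_characters = [] then string
  else
    String.ofList ((PySem.List.enumerate string.toList 0).foldl
      (fun acc p => acc ++ (if p.1 ∈ invalid_characters ∧ color ≠ "" then pvSpan color p.2 else [p.2])) [])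

-- ===== PORT B =====
-- the 'for i in indices' loop of Source B; string[i] is in range by construction, ported totally via pyGet?/getD
def htmlAltLoop (cs : List Char) (color : String) : List Int → Int → List Char
  | [], prev => PySem.List.slice cs (some prev) none
  | i :: rest, prev =>
      PySem.List.slice cs (some prev) (some i)
        ++ pvSpan color ((PySem.List.pyGet? cs i).getD ' ')
        ++ htmlAltLoop cs color rest (i + 1)

def html_format_invalid_characters_alt (string : String) (invalid_characters : List Int) (color : String) : String :=
  if invalid_characters = [] then string
  else if color = "" then string
  else
    let cs := string.toList
    let indices := PySem.List.sorted
      (PySem.Set.ofList (invalid_characters.filter (fun i => decide (0 ≤ i) && decide (i < (cs.length : Int)))))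
      (fun x => x) false
    String.ofList (htmlAltLoop cs color indices 0)

-- ===== PRECONDITION & SPEC =====
def Spec_html_format_invalid_characters (string : String) (invalid_characters : List Int) (color : String) (out : String) : Prop := out = html_format_invalid_characters_alt string invalid_characters color
instance (string : String) (invalid_characters : List Int) (color : String) (out : String) : Decidable (Spec_html_format_invalid_characters string invalid_characters color out) := by unfold Spec_html_format_invalid_characters; infer_instance

-- ===== CLAIM (what is proved, stated in full; the proofs are below) =====
def Claim_equal_html_format_invalid_characters : Prop := ∀ (string : String) (invalid_characters : List Int) (color : String), Dom_html_format_invalid_characters string invalid_characters color → Spec_html_format_invalid_characters string invalid_characters color (html_format_invalid_characters string invalid_characters color)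

-- ===== LEMMAS AND PROOFS =====

-- flatMap over enumerate where the condition never fires gives back the list
theorem pv_flatMap_enum_none (inv : List Int) (f : Int × Char → List Char) :
    ∀ (l : List Char) (s : Int), (∀ j : Int, s ≤ j → j < s + l.length → j ∉ inv) →
    (PySem.List.enumerate l s).flatMap (fun p => if p.1 ∈ inv then f p else [p.2]) = l := by
  intro l
  induction l with
  | nil => intro s _; simp [PySem.List.enumerate_nil]
  | cons c t ih =>
    intro s h
    rw [PySem.List.enumerate_cons]
    have hs : s ∉ inv := h s le_rfl (by simp)
    simp only [List.flatMap_cons, if_neg hs]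
    rw [ih (s + 1) (fun j h1 h2 => h j (by omega) (by simp at h2 ⊢; omega))]
    simp

-- main loop lemma: the slice walk over sorted in-range indices equals the per-position flatMap
theorem pv_loop_eq (cs : List Char) (color : String) (inv : List Int) :
    ∀ (idxs : List Int) (prev : Nat),
      idxs.Pairwise (· < ·) →
      (∀ j : Int, j ∈ idxs ↔ (j ∈ inv ∧ (prev : Int) ≤ j ∧ j < (cs.length : Int))) →
      htmlAltLoop cs color idxs (prev : Int)
        = (PySem.List.enumerate (cs.drop prev) (prev : Int)).flatMap
            (fun p => if p.1 ∈ inv then pvSpan color p.2 else [p.2]) := by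
  intro idxs
  induction idxs with
  | nil =>
    intro prev _ hiff
    rw [htmlAltLoop, PySem.List.slice_from_natCast]
    exact (pv_flatMap_enum_none inv _ _ _ (fun j h1 h2 => by
      intro hj
      have := (hiff j).not.mp (by simp)
      simp [List.length_drop] at h2
      exact this ⟨hj, h1, by omega⟩)).symm
  | cons i rest ih =>
    intro prev hp hiff
    have hi := (hiff i).mp (List.mem_cons_self)
    obtain ⟨hinv, hge, hlt⟩ := hi
    have hrest_gt : ∀ j ∈ rest, i < j := by
      intro j hj; exact (List.pairwise_cons.mp hp).1 j hj
    set k := i.toNat with hk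
    have hik : i = (k : Int) := by omega
    have hkp : prev ≤ k := by omega
    have hkn : k < cs.length := by omega
    -- decompose the suffix at position k
    have hdecomp : cs.drop prev
        = (cs.drop prev).take (k - prev) ++ (cs[k] :: cs.drop (k + 1)) := by
      conv_lhs => rw [← List.take_append_drop (k - prev) (cs.drop prev)]
      congr 1
      rw [List.drop_drop]
      have : prev + (k - prev) = k := by omega
      rw [this, List.drop_eq_getElem_cons hkn]
    rw [htmlAltLoop, hik, PySem.List.slice_natCast]
    have hget : (PySem.List.pyGet? cs (k : Int)).getD ' ' = cs[k] := by
      rw [PySem.List.pyGet?_natCast]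
      simp [hkn]
    rw [hget]
    have hlen : ((cs.drop prev).take (k - prev)).length = k - prev := by
      simp [List.length_take, List.length_drop]; omega
    conv_rhs => rw [hdecomp, PySem.List.enumerate_append]
    rw [List.flatMap_append, hlen]
    have hstart : (prev : Int) + ((k : Nat) - prev : Nat) = (k : Int) := by
      push_cast [Nat.cast_sub hkp]; ring
    -- front segment: no marked index in [prev, k)
    have hfront : (PySem.List.enumerate ((cs.drop prev).take (k - prev)) (prev : Int)).flatMap
        (fun p => if p.1 ∈ inv then pvSpan color p.2 else [p.2])
        = (cs.drop prev).take (k - prev) := by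
      apply pv_flatMap_enum_none
      intro j h1 h2 hj
      rw [hlen] at h2
      have hjlt : j < (k : Int) := by omega
      have : j ∈ i :: rest := (hiff j).mpr ⟨hj, h1, by omega⟩
      rcases List.mem_cons.mp this with h | h
      · omega
      · have := hrest_gt j h; omega
    rw [hstart, PySem.List.enumerate_cons, List.flatMap_cons, hfront]
    have hinv' : ((k : Nat) : Int) ∈ inv := by rw [← hik]; exact hinv
    have hif : (if (((k : Nat) : Int), cs[k]).1 ∈ inv then pvSpan color (((k : Nat) : Int), cs[k]).2 else [(((k : Nat) : Int), cs[k]).2]) = pvSpan color cs[k] := if_pos hinv'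
    rw [hif]
    -- tail: apply IH at prev := k + 1
    have hik1 : (k : Int) + 1 = ((k + 1 : Nat) : Int) := by push_cast; ring
    rw [hik1, ih (k + 1) (List.pairwise_cons.mp hp).2 (by
      intro j
      constructor
      · intro hj
        obtain ⟨ha, hb, hc⟩ := (hiff j).mp (List.mem_cons_of_mem _ hj)
        exact ⟨ha, by have := hrest_gt j hj; push_cast; omega, hc⟩
      · rintro ⟨ha, hb, hc⟩
        have : j ∈ i :: rest := (hiff j).mpr ⟨ha, by push_cast at hb ⊢; omega, hc⟩
        rcases List.mem_cons.mp this with h | h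
        · exfalso; push_cast at hb; omega
        · exact h)]
    simp [List.append_assoc]

-- membership in B's sorted, deduplicated, range-filtered index list
theorem pv_mem_indices (invalid_characters : List Int) (n : Nat) (j : Int) :
    j ∈ PySem.List.sorted
        (PySem.Set.ofList (invalid_characters.filter (fun i => decide (0 ≤ i) && decide (i < (n : Int)))))
        (fun x => x) false
      ↔ (j ∈ invalid_characters ∧ (0 : Int) ≤ j ∧ j < (n : Int)) := by
  rw [PySem.List.mem_sorted, PySem.Set.mem_ofList, List.mem_filter]
  simp

theorem html_spec_aux (string : String) (invalid_characters : List Int) (color : String) :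
    html_format_invalid_characters string invalid_characters color
      = html_format_invalid_characters_alt string invalid_characters color := by
  unfold html_format_invalid_characters html_format_invalid_characters_alt
  by_cases hemp : invalid_characters = []
  · simp [hemp]
  · rw [if_neg hemp, if_neg hemp]
    by_cases hcol : color = ""
    · rw [if_pos hcol]
      rw [PySem.List.foldl_append_eq_flatMap]
      have : (PySem.List.enumerate string.toList 0).flatMap
          (fun p => if p.1 ∈ invalid_characters ∧ color ≠ "" then pvSpan color p.2 else [p.2])
          = string.toList := by
        subst hcol
        simp only [ne_eq, not_true_eq_false, and_false, if_false]
        rw [← List.map_eq_flatMap, PySem.List.map_snd_enumerate]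
      rw [this]
      simp [String.ofList]
    · rw [if_neg hcol]
      rw [PySem.List.foldl_append_eq_flatMap]
      simp only [List.nil_append]
      congr 1
      have hcond : (fun p : Int × Char => if p.1 ∈ invalid_characters ∧ color ≠ "" then pvSpan color p.2 else [p.2])
          = (fun p : Int × Char => if p.1 ∈ invalid_characters then pvSpan color p.2 else [p.2]) := by
        funext p; simp [hcol]
      rw [hcond]
      have := pv_loop_eq string.toList color invalid_characters
        (PySem.List.sorted
          (PySem.Set.ofList (invalid_characters.filter (fun i => decide (0 ≤ i) && decide (i < (string.toList.length : Int)))))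
          (fun x => x) false)
        0
        (PySem.List.sorted_ofList_pairwise_lt _)
        (by intro j; rw [pv_mem_indices]; simp)
      simpa using this.symm

-- ===== VERDICT (by name: the statement is the Claim_ definition above) =====
theorem html_format_invalid_characters_spec : Claim_equal_html_format_invalid_characters := by
  intro string invalid_characters color _
  unfold Spec_html_format_invalid_characters
  exact html_spec_aux string invalid_characters color
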